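-- pv_equiv track=rewrite | github.com/StAnonymousHY/UMD-CMSC-Codes | CMSC423_Project/P09/Peptide.py | LengthOfPeptide
-- ===== SOURCE A (Python) =====
-- def Sum(length):
--     sum = 0
--     for i in range(length+1):
--         sum+=i
--     for i in range(length-1):
--         sum += i
--     return sum+1
--
-- def LengthOfPeptide(length):
--     if length == 1:
--         return 1
--     else:
--         l = 3
--         while Sum(l) < length:
--             l+=1
--         if Sum(l) == length:
--             return l
--         else:
--             return l-1
-- ===== SOURCE B (Python) =====
-- def _val(l):
--     # closed form of A's Sum: Sum(l) = l*l - l + 2 for l >= 1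
--     return l * l - l + 2
--
-- def LengthOfPeptide(length):
--     if length == 1:
--         return 1
--     lo, hi = 3, max(3, length)  # _val(hi) >= hi + 1 >= length, so the answer is in [3, hi]
--     while lo < hi:
--         mid = (lo + hi) // 2
--         if _val(mid) < length:
--             lo = mid + 1
--         else:
--             hi = mid
--     return lo if _val(lo) == length else lo - 1
-- ===== Notes on version B (the rewrite author's own statement) =====
-- stated objective: faster
-- what changed: Replaced the O(l)-per-step Sum loop plus linear search (A recomputes a triangular-number sum from scratch each step) with the closed form l*l-l+2 and a binary search for the least l with val(l) >= length.
import Mathlib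
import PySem

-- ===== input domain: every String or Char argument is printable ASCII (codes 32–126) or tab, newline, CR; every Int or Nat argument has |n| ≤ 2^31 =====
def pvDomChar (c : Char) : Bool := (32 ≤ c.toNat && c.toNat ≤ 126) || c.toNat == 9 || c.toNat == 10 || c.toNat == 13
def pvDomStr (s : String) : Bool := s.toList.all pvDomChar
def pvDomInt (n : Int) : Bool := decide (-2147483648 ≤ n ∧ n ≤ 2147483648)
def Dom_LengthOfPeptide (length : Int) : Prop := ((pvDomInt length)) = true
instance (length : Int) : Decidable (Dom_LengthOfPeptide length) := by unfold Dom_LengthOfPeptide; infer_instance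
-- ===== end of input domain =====

-- B replaces A's per-step triangular-sum loop and linear search by the closed form
-- l*l - l + 2 and a binary search (objective: faster; asymptotic change).

-- ===== PORT A =====

-- Sum(length): two range-loops accumulating, then +1
def SumPy (length : Int) : Int :=
  let s1 := (PySem.List.pyRange 0 (length + 1) 1).foldl (fun a i => a + i) 0
  let s2 := (PySem.List.pyRange 0 (length - 1) 1).foldl (fun a i => a + i) s1
  s2 + 1

-- needed by LoopA's termination proof (cited in decreasing_by)
theorem foldl_add_le (xs : List Int) : ∀ c : Int, (∀ x ∈ xs, 0 ≤ x) →
    c ≤ xs.foldl (fun a i => a + i) c := by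
  induction xs with
  | nil => intro c _; simp
  | cons x t ih =>
    intro c h
    have hx : 0 ≤ x := h x (List.mem_cons_self)
    have ht := ih (c + x) (fun y hy => h y (List.mem_cons_of_mem x hy))
    simp only [List.foldl_cons]
    omega

theorem SumPy_ge (l : Int) : l + 1 ≤ SumPy l := by
  simp only [SumPy]
  have hnn1 : ∀ x ∈ PySem.List.pyRange 0 (l + 1) 1, (0 : Int) ≤ x := by
    intro x hx
    exact ((PySem.List.mem_pyRange_one).mp hx).1
  have hnn2 : ∀ x ∈ PySem.List.pyRange 0 (l - 1) 1, (0 : Int) ≤ x := by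
    intro x hx
    exact ((PySem.List.mem_pyRange_one).mp hx).1
  by_cases hl : l ≤ 0
  · have h1 := foldl_add_le (PySem.List.pyRange 0 (l + 1) 1) (0 : Int) hnn1
    have h2 := foldl_add_le (PySem.List.pyRange 0 (l - 1) 1)
      ((PySem.List.pyRange 0 (l + 1) 1).foldl (fun a i => a + i) 0) hnn2
    omega
  · have hsplit : PySem.List.pyRange 0 (l + 1) 1
        = PySem.List.pyRange 0 l 1 ++ [l] :=
      PySem.List.pyRange_one_succ_right (by omega)
    rw [hsplit] at hnn1 ⊢
    have h0 : (0 : Int) ≤ (PySem.List.pyRange 0 l 1).foldl (fun a i => a + i) 0 := by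
      refine foldl_add_le _ 0 ?_
      intro x hx
      exact hnn1 x (List.mem_append_left _ hx)
    rw [List.foldl_append]
    simp only [List.foldl_cons, List.foldl_nil]
    have h2 := foldl_add_le (PySem.List.pyRange 0 (l - 1) 1)
      ((PySem.List.pyRange 0 l 1).foldl (fun a i => a + i) 0 + l) hnn2
    omega

-- the while-loop of A: l += 1 while Sum(l) < length
def LoopA (length l : Int) : Int :=
  if SumPy l < length then LoopA length (l + 1) else l
termination_by (length - l).toNat
decreasing_by
  have := SumPy_ge l
  omega

def LengthOfPeptide (length : Int) : Int :=
  if length = 1 then 1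
  else
    let l := LoopA length 3
    if SumPy l = length then l else l - 1

-- ===== PORT B =====

-- closed form of A's Sum for l >= 1
def valB (l : Int) : Int := l * l - l + 2

def bsearch (length lo hi : Int) : Int :=
  if lo < hi then
    let mid := PySem.Int.floordiv (lo + hi) 2
    if valB mid < length then bsearch length (mid + 1) hi
    else bsearch length lo mid
  else lo
termination_by (hi - lo).toNat
decreasing_by
  · have := PySem.Int.floordiv_two_mid_bounds (le_of_lt (by assumption : lo < hi))
    have hlt : PySem.Int.floordiv (lo + hi) 2 < hi := by
      rw [PySem.Int.floordiv_lt_iff_lt_mul (by norm_num)]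
      omega
    omega
  · have := PySem.Int.floordiv_two_mid_bounds (le_of_lt (by assumption : lo < hi))
    have hlt : PySem.Int.floordiv (lo + hi) 2 < hi := by
      rw [PySem.Int.floordiv_lt_iff_lt_mul (by norm_num)]
      omega
    omega

def LengthOfPeptide_alt (length : Int) : Int :=
  if length = 1 then 1
  else
    let lo := bsearch length 3 (max 3 length)
    if valB lo = length then lo else lo - 1

-- ===== PRECONDITION & SPEC =====
def Spec_LengthOfPeptide (length : Int) (out : Int) : Prop := out = LengthOfPeptide_alt length
instance (length : Int) (out : Int) : Decidable (Spec_LengthOfPeptide length out) := by unfold Spec_LengthOfPeptide; infer_instance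

-- ===== CLAIM (what is proved, stated in full; the proofs are below) =====
def Claim_equal_LengthOfPeptide : Prop := ∀ (length : Int), Dom_LengthOfPeptide length → Spec_LengthOfPeptide length (LengthOfPeptide length)

-- ===== LEMMAS AND PROOFS =====

-- needed by LoopA's termination proof (cited in decreasing_by)
theorem foldl_add_shift (xs : List Int) : ∀ c : Int,
    xs.foldl (fun a i => a + i) c = c + xs.foldl (fun a i => a + i) 0 := by
  induction xs with
  | nil => intro c; simp
  | cons x t ih =>
    intro c
    simp only [List.foldl_cons]
    rw [ih (c + x), ih (0 + x)]
    ring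

theorem sum_pyRange_two_mul (n : Nat) :
    2 * ((PySem.List.pyRange 0 (n : Int) 1).foldl (fun a i => a + i) 0) = (n : Int) * ((n : Int) - 1) := by
  induction n with
  | zero => simp [PySem.List.pyRange_one_eq_nil]
  | succ k ih =>
    have h : PySem.List.pyRange 0 ((k : Int) + 1) 1
        = PySem.List.pyRange 0 (k : Int) 1 ++ [(k : Int)] := by
      exact PySem.List.pyRange_one_succ_right (by exact_mod_cast Nat.zero_le k)
    push_cast
    rw [h, List.foldl_append]
    simp only [List.foldl_cons, List.foldl_nil]
    rw [foldl_add_shift]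
    push_cast at ih
    linarith

theorem SumPy_closed (l : Int) (h : 1 ≤ l) : SumPy l = l * l - l + 2 := by
  simp only [SumPy]
  have h1 := sum_pyRange_two_mul (l + 1).toNat
  have h2 := sum_pyRange_two_mul (l - 1).toNat
  rw [Int.toNat_of_nonneg (by omega)] at h1 h2
  rw [foldl_add_shift]
  nlinarith [h1, h2]

theorem valB_ge (l : Int) : l + 1 ≤ valB l := by
  unfold valB; nlinarith [sq_nonneg (l - 1)]

theorem valB_mono {a b : Int} (ha : 1 ≤ a) (hab : a ≤ b) : valB a ≤ valB b := by
  unfold valB; nlinarith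

-- A's loop returns the least l' ≥ l with Sum(l') ≥ length
theorem LoopA_spec (length : Int) : ∀ (n : Nat) (l : Int), (length - l).toNat = n →
    l ≤ LoopA length l ∧ length ≤ SumPy (LoopA length l) ∧
    (∀ m, l ≤ m → m < LoopA length l → SumPy m < length) := by
  intro n
  induction n using Nat.strong_induction_on with
  | _ n ih =>
    intro l hn
    rw [LoopA]
    split_ifs with hlt
    · have hs := SumPy_ge l
      have hrec := ih (length - (l + 1)).toNat (by omega) (l + 1) rfl
      refine ⟨by omega, hrec.2.1, ?_⟩
      intro m hm1 hm2
      rcases eq_or_lt_of_le hm1 with h | h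
      · rw [← h]; exact hlt
      · exact hrec.2.2 m (by omega) hm2
    · exact ⟨le_refl l, by omega, by intro m h1 h2; omega⟩

-- B's binary search returns the least l ∈ [lo, hi] with valB l ≥ length
theorem bsearch_spec (length : Int) : ∀ (n : Nat) (lo hi : Int), (hi - lo).toNat = n →
    1 ≤ lo → lo ≤ hi → length ≤ valB hi →
    lo ≤ bsearch length lo hi ∧ length ≤ valB (bsearch length lo hi) ∧
    (∀ m, lo ≤ m → m < bsearch length lo hi → valB m < length) := by
  intro n
  induction n using Nat.strong_induction_on with
  | _ n ih =>
    intro lo hi hn h1 h2 h3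
    rw [bsearch]
    simp only []
    split_ifs with hlh hv
    · -- lo < hi, valB mid < length: recurse on [mid+1, hi]
      have := PySem.Int.floordiv_two_mid_bounds (le_of_lt hlh)
      have hlt : PySem.Int.floordiv (lo + hi) 2 < hi := by
        rw [PySem.Int.floordiv_lt_iff_lt_mul (by norm_num)]
        omega
      have hrec := ih (hi - (PySem.Int.floordiv (lo + hi) 2 + 1)).toNat (by omega)
        (PySem.Int.floordiv (lo + hi) 2 + 1) hi rfl (by omega) (by omega) h3
      refine ⟨by omega, hrec.2.1, ?_⟩
      intro m hm1 hm2
      by_cases hmid : m ≤ PySem.Int.floordiv (lo + hi) 2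
      · exact lt_of_le_of_lt (valB_mono (by omega) hmid) hv
      · exact hrec.2.2 m (by omega) hm2
    · -- lo < hi, valB mid ≥ length: recurse on [lo, mid]
      have := PySem.Int.floordiv_two_mid_bounds (le_of_lt hlh)
      have hlt : PySem.Int.floordiv (lo + hi) 2 < hi := by
        rw [PySem.Int.floordiv_lt_iff_lt_mul (by norm_num)]
        omega
      exact ih (PySem.Int.floordiv (lo + hi) 2 - lo).toNat (by omega)
        lo (PySem.Int.floordiv (lo + hi) 2) rfl h1 (by omega) (by omega)
    · -- lo = hi
      have : lo = hi := by omega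
      subst this
      exact ⟨le_refl lo, h3, by intro m hm1 hm2; omega⟩

-- ===== VERDICT (by name: the statement is the Claim_ definition above) =====
theorem LengthOfPeptide_spec : Claim_equal_LengthOfPeptide := by
  intro length _
  unfold Spec_LengthOfPeptide LengthOfPeptide LengthOfPeptide_alt
  by_cases h1 : length = 1
  · simp [h1]
  · simp only [h1, if_false]
    have hA := LoopA_spec length (length - 3).toNat 3 rfl
    have hhi : (3 : Int) ≤ max 3 length := le_max_left _ _
    have hvhi : length ≤ valB (max 3 length) := by
      have := valB_ge (max 3 length)
      have := le_max_right (3 : Int) length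
      omega
    have hB := bsearch_spec length ((max 3 length) - 3).toNat 3 (max 3 length) rfl
      (by norm_num) hhi hvhi
    set rA := LoopA length 3 with hrA
    set rB := bsearch length 3 (max 3 length) with hrB
    have hSA : SumPy rA = valB rA := SumPy_closed rA (by omega) ▸ rfl
    have hval_rA : length ≤ valB rA := hSA ▸ hA.2.1
    have heq : rA = rB := by
      rcases lt_trichotomy rA rB with h | h | h
      · have := hB.2.2 rA hA.1 h
        omega
      · exact h
      · have := hA.2.2 rB hB.1 h
        have hvB : SumPy rB = valB rB := SumPy_closed rB (by omega)
        omega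
    rw [SumPy_closed rA (by omega), heq]
    simp [valB]
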